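-- pv_equiv track=rewrite | github.com/ProjectSeventy/TildeSummariser | TildeSummariser/utils/topic_ident_utils.py | prune_candidates
-- ===== SOURCE A (Python) =====
-- def prune_candidates(candidates_no_duplication, keyword_scores, candidate_appearances):
--
--     #Count the number of appearances for each candidate
--     appear = [len(app) for app in candidate_appearances]
--
--     #Get indices for when appearances is more than 1
--     compound_inds = [index for index, value in enumerate(appear) if value > 1]
--
--     #Trim lists to only contain the given indices
--     candidates_no_duplication = [candidates_no_duplication[index] for index in compound_inds]
--     keyword_scores = [keyword_scores[index] for index in compound_inds]
--
--     #Re-order the remaining candidates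
--     ranked_keywords = [key for score, key in
--                           sorted(zip(keyword_scores, candidates_no_duplication), key=lambda score: score[0],
--                                  reverse=True)]
--     ranked_scores = [score for score, key in
--                           sorted(zip(keyword_scores, candidates_no_duplication), key=lambda score: score[0],
--                                  reverse=True)]
--
--     return ranked_keywords, ranked_scores
-- ===== SOURCE B (Python) =====
-- def prune_candidates(candidates_no_duplication, keyword_scores, candidate_appearances):
--     # Online stable insertion: keep `ranked` sorted by score descending at all times;
--     # each surviving (score, key) pair is inserted after every pair whose score is >= its own,
--     # so ties keep their original order. No call to sort(), no index table.
--     ranked = []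
--     for key, score, apps in zip(candidates_no_duplication, keyword_scores, candidate_appearances):
--         if len(apps) > 1:
--             i = 0
--             while i < len(ranked) and ranked[i][0] >= score:
--                 i += 1
--             ranked.insert(i, (score, key))
--     return [k for _, k in ranked], [s for s, _ in ranked]
-- ===== Notes on version B (the rewrite author's own statement) =====
-- stated objective: alternative
-- what changed: B replaces A's index table (enumerate-filter indices, two indexed trim passes, two identical library sorts of a zip) with an online stable insertion: one pass over zip(candidates, scores, appearances) that inserts each surviving (score, key) pair into an always-descending list, then unzips; no sort call at all.
import Mathlib
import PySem

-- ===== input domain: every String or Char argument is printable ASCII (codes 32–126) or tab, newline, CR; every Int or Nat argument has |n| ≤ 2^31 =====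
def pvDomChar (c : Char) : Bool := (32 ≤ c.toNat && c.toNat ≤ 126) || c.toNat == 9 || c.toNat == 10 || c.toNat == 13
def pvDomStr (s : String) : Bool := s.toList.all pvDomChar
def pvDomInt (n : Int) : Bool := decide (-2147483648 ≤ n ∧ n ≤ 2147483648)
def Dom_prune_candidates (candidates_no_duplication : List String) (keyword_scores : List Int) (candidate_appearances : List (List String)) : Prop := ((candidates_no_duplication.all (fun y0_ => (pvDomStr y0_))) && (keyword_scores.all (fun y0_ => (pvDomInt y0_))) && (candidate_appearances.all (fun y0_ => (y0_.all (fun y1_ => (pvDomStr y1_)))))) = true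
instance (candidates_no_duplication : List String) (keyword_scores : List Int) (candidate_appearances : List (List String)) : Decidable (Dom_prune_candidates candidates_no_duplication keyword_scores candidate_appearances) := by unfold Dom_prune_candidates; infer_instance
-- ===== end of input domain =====

-- ===== PORT A =====
-- B replaces A's index table and two library sorts with an online stable insertion pass
-- (no sort call); equivalence on Pre_ (all compound indices in range; outside it A raises
-- IndexError). pyGetD is exact here: Pre_ guarantees every index used is in range.
def prune_candidates (candidates_no_duplication : List String) (keyword_scores : List Int) (candidate_appearances : List (List String)) : List String × List Int :=
  let appear : List Int := candidate_appearances.map (fun app => (app.length : Int))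
  let compound_inds : List Int :=
    (PySem.List.enumerate appear).filterMap (fun iv => if iv.2 > 1 then some iv.1 else none)
  let candidates' := compound_inds.map (fun index => PySem.List.pyGetD candidates_no_duplication index "")
  let scores' := compound_inds.map (fun index => PySem.List.pyGetD keyword_scores index 0)
  let ranked_keywords :=
    (PySem.List.sorted (scores'.zip candidates') (fun score => score.1) true).map (fun p => p.2)
  let ranked_scores :=
    (PySem.List.sorted (scores'.zip candidates') (fun score => score.1) true).map (fun p => p.1)
  (ranked_keywords, ranked_scores)

-- ===== PORT B =====
-- transcription of Source B's while/insert: walk past every pair with score >= the new one,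
-- insert there (stable, descending)
def pcInsert (score : Int) (key : String) : List (Int × String) → List (Int × String)
  | [] => [(score, key)]
  | p :: rest => if p.1 ≥ score then p :: pcInsert score key rest else (score, key) :: p :: rest

def prune_candidates_alt (candidates_no_duplication : List String) (keyword_scores : List Int) (candidate_appearances : List (List String)) : List String × List Int :=
  let ranked :=
    (candidates_no_duplication.zip (keyword_scores.zip candidate_appearances)).foldl
      (fun acc t => if 1 < t.2.2.length then pcInsert t.2.1 t.1 acc else acc) []
  (ranked.map (fun p => p.2), ranked.map (fun p => p.1))

-- ===== PRECONDITION & SPEC =====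
-- Pre_: every index whose appearance list has length > 1 is in range of both other lists;
-- exactly the inputs on which Python A returns (outside it A raises IndexError).
def Pre_prune_candidates (candidates_no_duplication : List String) (keyword_scores : List Int) (candidate_appearances : List (List String)) : Prop :=
  ∀ i < candidate_appearances.length,
    1 < (candidate_appearances.getD i []).length →
      i < candidates_no_duplication.length ∧ i < keyword_scores.length
instance (candidates_no_duplication : List String) (keyword_scores : List Int) (candidate_appearances : List (List String)) : Decidable (Pre_prune_candidates candidates_no_duplication keyword_scores candidate_appearances) := by unfold Pre_prune_candidates; infer_instance
def pvWitness_prune_candidates : List String × List Int × List (List String) :=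
  (["ab", "cd", "e"], [1, 5, 5], [["x", "y"], ["z"], ["p", "q"]])

def Spec_prune_candidates (candidates_no_duplication : List String) (keyword_scores : List Int) (candidate_appearances : List (List String)) (out : List String × List Int) : Prop := out = prune_candidates_alt candidates_no_duplication keyword_scores candidate_appearances
instance (candidates_no_duplication : List String) (keyword_scores : List Int) (candidate_appearances : List (List String)) (out : List String × List Int) : Decidable (Spec_prune_candidates candidates_no_duplication keyword_scores candidate_appearances out) := by unfold Spec_prune_candidates; infer_instance

-- ===== CLAIM (what is proved, stated in full; the proofs are below) =====
def Claim_equal_prune_candidates : Prop := ∀ (candidates_no_duplication : List String) (keyword_scores : List Int) (candidate_appearances : List (List String)), Dom_prune_candidates candidates_no_duplication keyword_scores candidate_appearances → Pre_prune_candidates candidates_no_duplication keyword_scores candidate_appearances → Spec_prune_candidates candidates_no_duplication keyword_scores candidate_appearances (prune_candidates candidates_no_duplication keyword_scores candidate_appearances)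

-- ===== LEMMAS AND PROOFS =====

-- the common (score, key) pair list both programs order
def pcPairs : List String → List Int → List (List String) → List (Int × String)
  | k :: c, s :: ks, a :: ca => (if 1 < a.length then [(s, k)] else []) ++ pcPairs c ks ca
  | _, _, _ => []

-- A's compound index list, as a standalone definition for the lemmas
def pcInds (ca : List (List String)) : List Int :=
  (PySem.List.enumerate (ca.map (fun a => (a.length : Int)))).filterMap
    (fun iv => if iv.2 > 1 then some iv.1 else none)

lemma enumerate_shift {α : Type} (xs : List α) (s : Int) :
    PySem.List.enumerate xs s = (PySem.List.enumerate xs 0).map (fun p => (p.1 + s, p.2)) := by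
  induction xs generalizing s with
  | nil => simp [PySem.List.enumerate_nil]
  | cons x xs ih =>
    rw [PySem.List.enumerate_cons, PySem.List.enumerate_cons, ih (s + 1), ih (0 + 1)]
    simp [List.map_map, Function.comp]
    intro a b _
    omega

lemma pcInds_cons (a : List String) (ca : List (List String)) :
    pcInds (a :: ca) =
      (if 1 < a.length then [(0 : Int)] else []) ++ (pcInds ca).map (fun i => i + 1) := by
  unfold pcInds
  rw [List.map_cons, PySem.List.enumerate_cons, enumerate_shift _ (0 + 1),
      show ((0 : Int) + 1) = 1 from by decide, List.filterMap_cons]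
  have h2 : ((PySem.List.enumerate (ca.map (fun a => (a.length : Int))) 0).map
        (fun p => (p.1 + 1, p.2))).filterMap (fun iv => if iv.2 > 1 then some iv.1 else none)
      = ((PySem.List.enumerate (ca.map (fun a => (a.length : Int))) 0).filterMap
          (fun iv => if iv.2 > 1 then some iv.1 else none)).map (fun i => i + 1) := by
    rw [List.filterMap_map, List.map_filterMap]
    apply List.filterMap_congr
    intro p _
    by_cases h : p.2 > 1
    · simp [h]
    · simp [h]
  by_cases h : 1 < a.length
  · have h' : ((a.length : Int) > 1) := by exact_mod_cast h
    simp only [h', if_pos, h2]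
    simp [h]
  · have h' : ¬ ((a.length : Int) > 1) := by omega
    simp only [h', h2]
    simp [h]

lemma mem_pcInds {ca : List (List String)} {i : Int} :
    i ∈ pcInds ca ↔ ∃ k : Nat, k < ca.length ∧ i = (k : Int) ∧ 1 < (ca.getD k []).length := by
  induction ca generalizing i with
  | nil => simp [pcInds, PySem.List.enumerate_nil]
  | cons a ca ih =>
    rw [pcInds_cons]
    simp only [List.mem_append, List.mem_map, ih]
    constructor
    · rintro (h0 | ⟨j, ⟨k, hk, rfl, hlen⟩, rfl⟩)
      · by_cases h : 1 < a.length
        · simp [h] at h0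
          exact ⟨0, by simp, by simp [h0], by simpa using h⟩
        · simp [h] at h0
      · exact ⟨k + 1, by simpa using hk, by push_cast; ring, by simpa using hlen⟩
    · rintro ⟨k, hk, rfl, hlen⟩
      cases k with
      | zero =>
        left
        have h' : 1 < a.length := by simpa [List.getD] using hlen
        simp [h']
      | succ k =>
        right
        exact ⟨(k : Int), ⟨k, by simpa using hk, rfl, by simpa using hlen⟩, by push_cast; ring⟩

lemma a_pairs (c : List String) (ks : List Int) (ca : List (List String))
    (H : ∀ k < ca.length, 1 < (ca.getD k []).length → k < c.length ∧ k < ks.length) :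
    (pcInds ca).map (fun i => (PySem.List.pyGetD ks i 0, PySem.List.pyGetD c i "")) =
      pcPairs c ks ca := by
  induction ca generalizing c ks with
  | nil =>
    cases c <;> cases ks <;> simp [pcInds, PySem.List.enumerate_nil, pcPairs]
  | cons a ca ih =>
    rw [pcInds_cons]
    have Htail : ∀ k < ca.length, 1 < (ca.getD k []).length → k + 1 < c.length ∧ k + 1 < ks.length := by
      intro k hk hl
      exact H (k + 1) (by simpa using hk) (by simpa using hl)
    have tail_eq : ∀ (c' : List String) (s' : Int) (k' : String) (ks' : List Int),
        c = k' :: c' → ks = s' :: ks' →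
        ((pcInds ca).map (fun i => i + 1)).map
            (fun i => (PySem.List.pyGetD ks i 0, PySem.List.pyGetD c i "")) =
          pcPairs c' ks' ca := by
      intro c' s' k' ks' hc hks
      subst hc; subst hks
      rw [List.map_map]
      rw [show ((fun i => (PySem.List.pyGetD (s' :: ks') i 0, PySem.List.pyGetD (k' :: c') i "")) ∘
            (fun i : Int => i + 1)) = fun i => (PySem.List.pyGetD (s' :: ks') (i + 1) 0,
              PySem.List.pyGetD (k' :: c') (i + 1) "") from rfl]
      rw [← ih c' ks' (fun k hk hl => ⟨by have := (Htail k hk hl).1; simpa using this,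
            by have := (Htail k hk hl).2; simpa using this⟩)]
      apply List.map_congr_left
      intro i hi
      obtain ⟨k, hk, rfl, hlen⟩ := mem_pcInds.mp hi
      have h1 : ((k : Int) + 1) = ((k + 1 : Nat) : Int) := by push_cast; ring
      rw [h1, PySem.List.pyGetD_natCast, PySem.List.pyGetD_natCast,
          PySem.List.pyGetD_natCast, PySem.List.pyGetD_natCast]
      simp [List.getD]
    by_cases h : 1 < a.length
    · obtain ⟨hc, hks⟩ := H 0 (by simp) (by exact h)
      obtain ⟨k', c', rfl⟩ := List.exists_cons_of_ne_nil (List.ne_nil_of_length_pos hc)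
      obtain ⟨s', ks', rfl⟩ := List.exists_cons_of_ne_nil (List.ne_nil_of_length_pos hks)
      rw [if_pos h]
      simp only [List.singleton_append, List.map_cons]
      rw [tail_eq c' s' k' ks' rfl rfl]
      simp [pcPairs, h, PySem.List.pyGetD_zero_cons]
    · rw [if_neg h]
      simp only [List.nil_append]
      cases c with
      | nil =>
        have : pcInds ca = [] := by
          rw [List.eq_nil_iff_forall_not_mem]
          intro i hi
          obtain ⟨k, hk, rfl, hlen⟩ := mem_pcInds.mp hi
          have := (Htail k hk hlen).1
          simp at this
        simp [this, pcPairs]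
      | cons k' c' =>
        cases ks with
        | nil =>
          have : pcInds ca = [] := by
            rw [List.eq_nil_iff_forall_not_mem]
            intro i hi
            obtain ⟨k, hk, rfl, hlen⟩ := mem_pcInds.mp hi
            have := (Htail k hk hlen).2
            simp at this
          simp [this, pcPairs]
        | cons s' ks' =>
          rw [tail_eq c' s' k' ks' rfl rfl]
          simp [pcPairs, h]

-- B's hand-written insertion equals PySem's insertBy with the reverse-sort predicate
lemma pcInsert_eq_insertBy (s : Int) (k : String) (ys : List (Int × String)) :
    pcInsert s k ys = PySem.List.insertBy (fun a b => decide (b.1 < a.1)) (s, k) ys := by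
  induction ys with
  | nil => simp [pcInsert, PySem.List.insertBy]
  | cons y ys ih =>
    by_cases h : y.1 ≥ s
    · have h' : ¬ (y.1 < s) := by omega
      simp [pcInsert, PySem.List.insertBy, h, h', ih]
    · have h' : y.1 < s := by omega
      simp [pcInsert, PySem.List.insertBy, h, h']

-- B's filtering fold over the zip equals a fold over the common pair list
lemma b_fold (c : List String) (ks : List Int) (ca : List (List String))
    (acc : List (Int × String)) :
    (c.zip (ks.zip ca)).foldl
        (fun acc t => if 1 < t.2.2.length then pcInsert t.2.1 t.1 acc else acc) acc =
      (pcPairs c ks ca).foldl (fun acc p => pcInsert p.1 p.2 acc) acc := by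
  induction c generalizing ks ca acc with
  | nil => cases ks <;> cases ca <;> simp [pcPairs]
  | cons k c ih =>
    cases ks with
    | nil => cases ca <;> simp [pcPairs]
    | cons s ks =>
      cases ca with
      | nil => simp [pcPairs]
      | cons a ca =>
        by_cases h : 1 < a.length <;>
          simp [List.zip_cons_cons, h, pcPairs, ih]

-- B's accumulated list is exactly Python's stable reverse sort of the pair list
lemma b_ranked (c : List String) (ks : List Int) (ca : List (List String)) :
    (c.zip (ks.zip ca)).foldl
        (fun acc t => if 1 < t.2.2.length then pcInsert t.2.1 t.1 acc else acc) [] =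
      PySem.List.sorted (pcPairs c ks ca) (fun p => p.1) true := by
  rw [b_fold, PySem.List.sorted_rev_eq_foldl_insertBy]
  have hf : (fun (acc : List (Int × String)) (p : Int × String) => pcInsert p.1 p.2 acc) =
      fun acc p => PySem.List.insertBy (fun a b => decide (b.1 < a.1)) p acc := by
    funext acc p
    rw [pcInsert_eq_insertBy]
  rw [hf]

-- ===== VERDICT (by name: the statement is the Claim_ definition above) =====
theorem prune_candidates_spec : Claim_equal_prune_candidates := by
  intro c ks ca _ hpre
  have hA := a_pairs c ks ca hpre
  have hB := b_ranked c ks ca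
  unfold pcInds at hA
  unfold Claim_equal_prune_candidates Spec_prune_candidates prune_candidates prune_candidates_alt at *
  simp only [List.zip_map', hA, hB]
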